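-- pv_equiv track=rewrite | github.com/Chiki1601/Leetcode-Solution-in-Python3 | 2501-2600/2556.py | isPossibleToCutPath
-- ===== SOURCE A (Python) =====
-- from typing import List
--
-- def isPossibleToCutPath(a: List[List[int]]) -> bool:
--     m, n = len(a), len(a[0])
--     vis1 = [[0 for i in range(n+2)] for j in range(m+2)]
--     vis2 = [[0 for i in range(n+2)] for j in range(m+2)]
--     vis1[0][1], vis2[m][n+1] = 1, 1
--     cnt = [0] * (m+n-1)
--     for i in range(1, m+1):
--         for j in range(1, n+1):
--             vis1[i][j] = a[i-1][j-1] and (vis1[i-1][j] or vis1[i][j-1])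
--     for i in range(m, 0, -1):
--         for j in range(n, 0, -1):
--             vis2[i][j] = a[i-1][j-1] and (vis2[i+1][j] or vis2[i][j+1])
--             cnt[i+j-2] += vis1[i][j] and vis2[i][j]
--     return any(cnt[i] < 2 for i in range(1, n + m - 2))
-- ===== SOURCE B (Python) =====
-- from typing import List
--
-- def isPossibleToCutPath(a: List[List[int]]) -> bool:
--     m, n = len(a), len(a[0])
--     if m + n < 4:
--         return False  # no interior cell on any path: cannot cut
--     # one reverse scan: good[i][j] = cell open and the exit is reachable from it
--     good = [[False] * n for _ in range(m)]
--     for i in range(m - 1, -1, -1):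
--         for j in range(n - 1, -1, -1):
--             if a[i][j]:
--                 good[i][j] = ((i == m - 1 and j == n - 1)
--                               or (i + 1 < m and good[i + 1][j])
--                               or (j + 1 < n and good[i][j + 1]))
--     if not good[0][0]:
--         return True  # already disconnected
--     # walk the highest path (prefer right) and the lowest path (prefer down);
--     # the grid can be cut iff the two extremal paths pinch at an interior step
--     hi = lo = (0, 0)
--     touched = False
--     for _ in range(m + n - 3):
--         hi = (hi[0], hi[1] + 1) if hi[1] + 1 < n and good[hi[0]][hi[1] + 1] else (hi[0] + 1, hi[1])
--         lo = (lo[0] + 1, lo[1]) if lo[0] + 1 < m and good[lo[0] + 1][lo[1]] else (lo[0], lo[1] + 1)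
--         touched = touched or hi == lo
--     return touched
-- ===== Notes on version B (the rewrite author's own statement) =====
-- stated objective: faster
-- what changed: Replaces A's forward+backward reachability tables with per-anti-diagonal counting of doubly-reachable cells by a single reverse reach-the-exit scan followed by two greedy walks that extract the highest (prefer-right) and lowest (prefer-down) monotone paths; the answer is whether the two extremal paths pinch into the same cell at some interior step (or no path exists at all).
-- outside the precondition, e.g. on isPossibleToCutPath([[], [], [], []]): A returns True, B raises IndexError
import Mathlib
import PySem

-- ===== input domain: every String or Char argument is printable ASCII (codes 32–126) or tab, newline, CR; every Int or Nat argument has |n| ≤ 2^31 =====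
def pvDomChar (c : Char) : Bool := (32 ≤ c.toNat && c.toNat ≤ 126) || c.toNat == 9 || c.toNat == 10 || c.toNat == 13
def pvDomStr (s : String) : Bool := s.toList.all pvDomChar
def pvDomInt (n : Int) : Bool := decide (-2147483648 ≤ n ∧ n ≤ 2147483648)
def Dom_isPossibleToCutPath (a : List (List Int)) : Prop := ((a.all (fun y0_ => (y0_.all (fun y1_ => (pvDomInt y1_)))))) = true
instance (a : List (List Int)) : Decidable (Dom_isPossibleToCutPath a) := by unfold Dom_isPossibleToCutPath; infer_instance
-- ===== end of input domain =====

-- B replaces A's forward+backward tables with per-diagonal double-reachability counting by a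
-- single reverse reach-the-exit scan plus two greedy walks extracting the highest and lowest
-- monotone paths; answer = the extremal paths pinch at an interior step (measured faster).


-- ===== PORT A =====
-- Python truthiness helpers: `x and y` / `x or y` on ints
def pvAnd (x y : Int) : Int := if x = 0 then x else y
def pvOr (x y : Int) : Int := if x = 0 then y else x
-- v[i][j] read (total form; Pre_ keeps all used indices in range)
def pvGet2 (v : List (List Int)) (i j : Int) : Int :=
  PySem.List.pyGetD (PySem.List.pyGetD v i []) j 0
-- v[i][j] = x
def pvSet2 (v : List (List Int)) (i j : Int) (x : Int) : List (List Int) :=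
  PySem.List.pySetD v i (PySem.List.pySetD (PySem.List.pyGetD v i []) j x)
-- body of A's first double loop (vis1[i][j] = a[i-1][j-1] and (vis1[i-1][j] or vis1[i][j-1]))
def pvStep1 (a v : List (List Int)) (i j : Int) : List (List Int) :=
  pvSet2 v i j (pvAnd (pvGet2 a (i-1) (j-1)) (pvOr (pvGet2 v (i-1) j) (pvGet2 v i (j-1))))
-- body of A's second double loop (vis2 update + cnt[i+j-2] += vis1[i][j] and vis2[i][j])
def pvStep2 (a w : List (List Int)) (st : List (List Int) × List Int) (i j : Int) :
    List (List Int) × List Int :=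
  let v2 := pvSet2 st.1 i j (pvAnd (pvGet2 a (i-1) (j-1)) (pvOr (pvGet2 st.1 (i+1) j) (pvGet2 st.1 i (j+1))))
  (v2, PySem.List.pySetD st.2 (i+j-2)
        (PySem.List.pyGetD st.2 (i+j-2) 0 + pvAnd (pvGet2 w i j) (pvGet2 v2 i j)))

def isPossibleToCutPath (a : List (List Int)) : Bool :=
  let m : Int := a.length
  let n : Int := (PySem.List.pyGetD a 0 []).length
  let vis1 : List (List Int) :=
    (PySem.List.pyRange 0 (m+2) 1).map (fun _ => (PySem.List.pyRange 0 (n+2) 1).map (fun _ => 0))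
  let vis2 : List (List Int) :=
    (PySem.List.pyRange 0 (m+2) 1).map (fun _ => (PySem.List.pyRange 0 (n+2) 1).map (fun _ => 0))
  let vis1 := pvSet2 vis1 0 1 1
  let vis2 := pvSet2 vis2 m (n+1) 1
  let cnt : List Int := PySem.List.pyRepeat [0] (m+n-1)
  let vis1 := (PySem.List.pyRange 1 (m+1) 1).foldl (fun v i =>
      (PySem.List.pyRange 1 (n+1) 1).foldl (fun v j => pvStep1 a v i j) v) vis1
  let st := (PySem.List.pyRange m 0 (-1)).foldl (fun (st : List (List Int) × List Int) i =>
      (PySem.List.pyRange n 0 (-1)).foldl (fun st j => pvStep2 a vis1 st i j) st) (vis2, cnt)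
  (PySem.List.pyRange 1 (n+m-2) 1).any (fun i => decide (PySem.List.pyGetD st.2 i 0 < 2))

-- ===== PORT B =====
-- good[i][j] read / write (total forms; Pre_ keeps all used indices in range)
def pvGoodGet (g : List (List Bool)) (i j : Int) : Bool :=
  PySem.List.pyGetD (PySem.List.pyGetD g i []) j false
def pvGoodSet (g : List (List Bool)) (i j : Int) (x : Bool) : List (List Bool) :=
  PySem.List.pySetD g i (PySem.List.pySetD (PySem.List.pyGetD g i []) j x)
-- body of B's reverse scan: if a[i][j]: good[i][j] = (exit) or (down good) or (right good)
def pvGStep (a : List (List Int)) (m n : Int) (g : List (List Bool)) (i j : Int) :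
    List (List Bool) :=
  if pvGet2 a i j ≠ 0 then
    pvGoodSet g i j ((i == m-1 && j == n-1) || (decide (i+1 < m) && pvGoodGet g (i+1) j)
      || (decide (j+1 < n) && pvGoodGet g i (j+1)))
  else g
-- body of B's walk loop: advance the prefer-right walk and the prefer-down walk, record a pinch
def pvWalkStep (g : List (List Bool)) (m n : Int) (st : (Int × Int) × (Int × Int) × Bool) :
    (Int × Int) × (Int × Int) × Bool :=
  let hi := st.1
  let lo := st.2.1
  let hi' := if decide (hi.2 + 1 < n) && pvGoodGet g hi.1 (hi.2 + 1) then (hi.1, hi.2 + 1)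
             else (hi.1 + 1, hi.2)
  let lo' := if decide (lo.1 + 1 < m) && pvGoodGet g (lo.1 + 1) lo.2 then (lo.1 + 1, lo.2)
             else (lo.1, lo.2 + 1)
  (hi', lo', st.2.2 || (hi' == lo'))

def isPossibleToCutPath_alt (a : List (List Int)) : Bool :=
  let m : Int := a.length
  let n : Int := (PySem.List.pyGetD a 0 []).length
  if m + n < 4 then false
  else
    let good : List (List Bool) :=
      (PySem.List.pyRange 0 m 1).map (fun _ => PySem.List.pyRepeat [false] n)
    let good := (PySem.List.pyRange (m-1) (-1) (-1)).foldl (fun g i =>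
        (PySem.List.pyRange (n-1) (-1) (-1)).foldl (fun g j => pvGStep a m n g i j) g) good
    if !(pvGoodGet good 0 0) then true
    else
      let st := (PySem.List.pyRange 0 (m+n-3) 1).foldl
        (fun st (_ : Int) => pvWalkStep good m n st)
        (((0:Int),(0:Int)), (((0:Int),(0:Int)), false))
      st.2.2

-- ===== PRECONDITION & SPEC =====
-- Pre_ excludes the empty grid, grids with an empty first row and at least 4 rows (A returns a
-- vacuous value there while B's start-cell access raises IndexError), and ragged grids whose
-- later rows are shorter than the first (both A and B raise IndexError there).
def Pre_isPossibleToCutPath (a : List (List Int)) : Prop :=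
  a ≠ [] ∧ (0 < (a.headD []).length ∨ a.length ≤ 3) ∧
    ∀ r ∈ a, (a.headD []).length ≤ r.length
instance (a : List (List Int)) : Decidable (Pre_isPossibleToCutPath a) := by
  unfold Pre_isPossibleToCutPath; infer_instance
def pvWitness_isPossibleToCutPath : List (List Int) := [[1, 1], [1, 1]]

def Spec_isPossibleToCutPath (a : List (List Int)) (out : Bool) : Prop := out = isPossibleToCutPath_alt a
instance (a : List (List Int)) (out : Bool) : Decidable (Spec_isPossibleToCutPath a out) := by unfold Spec_isPossibleToCutPath; infer_instance

-- ===== CLAIM (what is proved, stated in full; the proofs are below) =====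
def Claim_equal_isPossibleToCutPath : Prop := ∀ (a : List (List Int)), Dom_isPossibleToCutPath a → Pre_isPossibleToCutPath a → Spec_isPossibleToCutPath a (isPossibleToCutPath a)

-- ===== LEMMAS AND PROOFS =====

-- ---- mathematical characterisations (proof-side only) ----

def pvEnc (b : Bool) : Int := if b then 1 else 0

def pvG (a : List (List Int)) (i j : Nat) : Int := (a.getD i []).getD j 0

-- forward reachability of table cell (i,j) (1-based; boundary row 0 seeded at column 1)
def pvR1 (a : List (List Int)) (i j : Nat) : Bool :=
  if i = 0 then j == 1
  else if j = 0 then false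
  else if i ≤ a.length ∧ j ≤ (a.headD []).length then
    (pvG a (i-1) (j-1) != 0) && (pvR1 a (i-1) j || pvR1 a i (j-1))
  else false
termination_by i + j
decreasing_by all_goals omega

-- backward reachability (seeded at (m, n+1))
def pvR2 (a : List (List Int)) (i j : Nat) : Bool :=
  if i = a.length ∧ j = (a.headD []).length + 1 then true
  else if 1 ≤ i ∧ i ≤ a.length ∧ 1 ≤ j ∧ j ≤ (a.headD []).length then
    (pvG a (i-1) (j-1) != 0) && (pvR2 a (i+1) j || pvR2 a i (j+1))
  else false
termination_by (a.length + 1 - i) + ((a.headD []).length + 1 - j)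
decreasing_by all_goals omega

def pvW (a : List (List Int)) (r c : Nat) : Int := pvEnc (pvR1 a r c && pvR2 a r c)

-- doubly-reachable, 0-based cell coordinates
def pvBR (a : List (List Int)) (r c : Nat) : Bool := pvR1 a (r+1) (c+1) && pvR2 a (r+1) (c+1)

-- contribution of (1-based) row r to diagonal d
def pvRowC (a : List (List Int)) (r d : Nat) : Int :=
  if 1 ≤ r ∧ r ≤ a.length ∧ r ≤ d+1 ∧ d+2 ≤ (a.headD []).length + r then pvW a r (d+2-r) else 0

-- partial contribution of row i to diagonal d when only columns > j are processed
def pvRowCp (a : List (List Int)) (i j d : Nat) : Int :=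
  if 1 ≤ i ∧ i ≤ a.length ∧ i ≤ d+1 ∧ d+2 ≤ (a.headD []).length + i ∧ j < d+2-i then pvW a i (d+2-i) else 0

-- cnt[d] after the reverse loop has processed rows > i fully and columns > j of row i
def pvCpart (a : List (List Int)) (i j d : Nat) : Int :=
  (((List.range (a.length - i)).map (fun k => pvRowC a (a.length - k) d)).sum) + pvRowCp a i j d

def pvDiagSum (a : List (List Int)) (d : Nat) : Int :=
  ((List.range a.length).map (fun k => pvRowC a (k+1) d)).sum

def pvShape (v : List (List Int)) (M N : Nat) : Prop :=
  v.length = M + 2 ∧ ∀ r ∈ v, r.length = N + 2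

def pvInv1 (a v : List (List Int)) (i j : Nat) : Prop :=
  pvShape v a.length (a.headD []).length ∧
  ∀ r c : Nat, r ≤ a.length + 1 → c ≤ (a.headD []).length + 1 →
    pvG v r c =
      if 1 ≤ r ∧ r ≤ a.length ∧ 1 ≤ c ∧ c ≤ (a.headD []).length ∧ ¬ (r < i ∨ (r = i ∧ c ≤ j))
      then 0 else pvEnc (pvR1 a r c)

def pvInv2 (a v : List (List Int)) (cnt : List Int) (i j : Nat) : Prop :=
  pvShape v a.length (a.headD []).length ∧
  (∀ r c : Nat, r ≤ a.length + 1 → c ≤ (a.headD []).length + 1 →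
    pvG v r c =
      if 1 ≤ r ∧ r ≤ a.length ∧ 1 ≤ c ∧ c ≤ (a.headD []).length ∧ ¬ (i < r ∨ (r = i ∧ j < c))
      then 0 else pvEnc (pvR2 a r c)) ∧
  cnt.length = a.length + (a.headD []).length - 1 ∧
  ∀ d : Nat, d < a.length + (a.headD []).length - 1 → cnt.getD d 0 = pvCpart a i j d

-- B-side proof objects: good value at a 0-based cell, and the invariant of the reverse scan
def pvGoodAt (g : List (List Bool)) (i j : Nat) : Bool := (g.getD i []).getD j false

def pvInvG (a : List (List Int)) (g : List (List Bool)) (i j : Nat) : Prop :=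
  g.length = a.length ∧ (∀ r ∈ g, r.length = (a.headD []).length) ∧
  ∀ r c : Nat, r < a.length → c < (a.headD []).length →
    pvGoodAt g r c = if i < r ∨ (r = i ∧ j ≤ c) then pvR2 a (r+1) (c+1) else false

-- row of the prefer-right (highest) walk on diagonal d
def pvHiR (a : List (List Int)) : Nat → Nat
  | 0 => 0
  | d+1 =>
    if d+1 - pvHiR a d < (a.headD []).length ∧
        pvR2 a (pvHiR a d + 1) (d+1 - pvHiR a d + 1) = true
    then pvHiR a d else pvHiR a d + 1

-- row of the prefer-down (lowest) walk on diagonal d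
def pvLoR (a : List (List Int)) : Nat → Nat
  | 0 => 0
  | d+1 =>
    if pvLoR a d + 1 < a.length ∧ pvR2 a (pvLoR a d + 2) (d - pvLoR a d + 1) = true
    then pvLoR a d + 1 else pvLoR a d

-- ---- basic bridges ----

theorem pvGet2_natCast (v : List (List Int)) (i j : Nat) : pvGet2 v (i:Int) (j:Int) = pvG v i j := by
  simp [pvGet2, pvG, PySem.List.pyGetD_natCast]

theorem pvGoodGet_natCast (g : List (List Bool)) (i j : Nat) :
    pvGoodGet g (i:Int) (j:Int) = pvGoodAt g i j := by
  simp [pvGoodGet, pvGoodAt, PySem.List.pyGetD_natCast]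

theorem pvAnd_enc (x : Int) (b : Bool) : pvAnd x (pvEnc b) = pvEnc ((x != 0) && b) := by
  cases b <;> by_cases hx : x = 0 <;> simp [pvAnd, pvEnc, hx]

theorem pvOr_enc (b c : Bool) : pvOr (pvEnc b) (pvEnc c) = pvEnc (b || c) := by
  cases b <;> cases c <;> simp [pvOr, pvEnc]

theorem pvAnd_enc_enc (b c : Bool) : pvAnd (pvEnc b) (pvEnc c) = pvEnc (b && c) := by
  cases b <;> cases c <;> simp [pvAnd, pvEnc]

theorem pvG_set (v : List (List Int)) (i j : Nat) (x : Int) (r c : Nat)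
    (hi : i < v.length) (hj : j < (v.getD i []).length) :
    pvG (v.set i ((v.getD i []).set j x)) r c =
      if r = i ∧ c = j then x else pvG v r c := by
  unfold pvG
  simp only [List.getD_eq_getElem?_getD] at hj ⊢
  rw [List.getElem?_set]
  by_cases hr : i = r
  · rw [if_pos hr, if_pos hi]
    subst hr
    simp only [Option.getD_some]
    rw [List.getElem?_set]
    by_cases hc : j = c
    · rw [if_pos hc, if_pos hj]
      subst hc
      simp
    · rw [if_neg hc]
      simp only [true_and]
      rw [if_neg (by omega : ¬ c = j)]
  · rw [if_neg hr, if_neg (by omega : ¬ (r = i ∧ c = j))]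

theorem pvGoodAt_set (v : List (List Bool)) (i j : Nat) (x : Bool) (r c : Nat)
    (hi : i < v.length) (hj : j < (v.getD i []).length) :
    pvGoodAt (v.set i ((v.getD i []).set j x)) r c =
      if r = i ∧ c = j then x else pvGoodAt v r c := by
  unfold pvGoodAt
  simp only [List.getD_eq_getElem?_getD] at hj ⊢
  rw [List.getElem?_set]
  by_cases hr : i = r
  · rw [if_pos hr, if_pos hi]
    subst hr
    simp only [Option.getD_some]
    rw [List.getElem?_set]
    by_cases hc : j = c
    · rw [if_pos hc, if_pos hj]
      subst hc
      simp
    · rw [if_neg hc]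
      simp only [true_and]
      rw [if_neg (by omega : ¬ c = j)]
  · rw [if_neg hr, if_neg (by omega : ¬ (r = i ∧ c = j))]

theorem pvSet2_natCast (v : List (List Int)) (i j : Nat) (x : Int) :
    pvSet2 v (i:Int) (j:Int) x = v.set i ((v.getD i []).set j x) := by
  simp [pvSet2, PySem.List.pySetD_natCast, PySem.List.pyGetD_natCast]

theorem pvGoodSet_natCast (v : List (List Bool)) (i j : Nat) (x : Bool) :
    pvGoodSet v (i:Int) (j:Int) x = v.set i ((v.getD i []).set j x) := by
  simp [pvGoodSet, PySem.List.pySetD_natCast, PySem.List.pyGetD_natCast]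

theorem pvShape_set (v : List (List Int)) (M N : Nat) (h : pvShape v M N) (i j : Nat) (x : Int) :
    pvShape (v.set i ((v.getD i []).set j x)) M N := by
  obtain ⟨h1, h2⟩ := h
  by_cases hi : i < v.length
  · refine ⟨by simp [h1], ?_⟩
    intro r hr
    rcases List.mem_or_eq_of_mem_set hr with hmem | heq
    · exact h2 r hmem
    · subst heq
      simp only [List.length_set]
      have hmem : v.getD i [] ∈ v := by
        rw [List.getD_eq_getElem?_getD, List.getElem?_eq_getElem hi]
        exact List.getElem_mem hi
      exact h2 _ hmem
  · rw [List.set_eq_of_length_le (by omega)]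
    exact ⟨h1, h2⟩

-- ---- unfoldings of pvR1 / pvR2 ----

theorem pvHead (a : List (List Int)) : PySem.List.pyGetD a 0 [] = a.headD [] := by
  rw [PySem.List.pyGetD_ofNat']
  cases a <;> rfl

theorem pvR1_zero (a : List (List Int)) (c : Nat) : pvR1 a 0 c = (c == 1) := by
  rw [pvR1]; simp

theorem pvR1_out (a : List (List Int)) (r c : Nat)
    (h : r ≠ 0 ∧ (c = 0 ∨ ¬(r ≤ a.length ∧ c ≤ (a.headD []).length))) : pvR1 a r c = false := by
  rw [pvR1, if_neg h.1]
  rcases h with ⟨hr, hc | hc⟩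
  · rw [if_pos hc]
  · by_cases hc0 : c = 0
    · rw [if_pos hc0]
    · rw [if_neg hc0, if_neg hc]

theorem pvR1_interior (a : List (List Int)) (r c : Nat) (h1 : 1 ≤ r) (h2 : r ≤ a.length)
    (h3 : 1 ≤ c) (h4 : c ≤ (a.headD []).length) :
    pvR1 a r c = ((pvG a (r-1) (c-1) != 0) && (pvR1 a (r-1) c || pvR1 a r (c-1))) := by
  rw [pvR1, if_neg (by omega : ¬ r = 0), if_neg (by omega : ¬ c = 0), if_pos ⟨h2, h4⟩]

theorem pvR2_base (a : List (List Int)) : pvR2 a a.length ((a.headD []).length + 1) = true := by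
  rw [pvR2]; simp

theorem pvR2_out (a : List (List Int)) (r c : Nat)
    (h : ¬(r = a.length ∧ c = (a.headD []).length + 1))
    (h' : ¬(1 ≤ r ∧ r ≤ a.length ∧ 1 ≤ c ∧ c ≤ (a.headD []).length)) : pvR2 a r c = false := by
  rw [pvR2]
  simp only [h, h', if_false]

theorem pvR2_interior (a : List (List Int)) (r c : Nat) (h1 : 1 ≤ r) (h2 : r ≤ a.length)
    (h3 : 1 ≤ c) (h4 : c ≤ (a.headD []).length) :
    pvR2 a r c = ((pvG a (r-1) (c-1) != 0) && (pvR2 a (r+1) c || pvR2 a r (c+1))) := by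
  rw [pvR2]
  rw [if_neg (by omega), if_pos ⟨h1, h2, h3, h4⟩]

-- ---- A, first double loop ----

theorem pvShape_row (v : List (List Int)) (M N : Nat) (h : pvShape v M N) (i : Nat)
    (hi : i < v.length) : (v.getD i []).length = N + 2 := by
  have hmem : v.getD i [] ∈ v := by
    rw [List.getD_eq_getElem?_getD, List.getElem?_eq_getElem hi]
    exact List.getElem_mem hi
  exact h.2 _ hmem

theorem pvInv1_step (a v : List (List Int)) (i j : Nat) (h1 : 1 ≤ i) (h2 : i ≤ a.length)
    (h3 : 1 ≤ j) (h4 : j ≤ (a.headD []).length) (hv : pvInv1 a v i (j-1)) :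
    pvInv1 a (pvStep1 a v (i:Int) (j:Int)) i j := by
  obtain ⟨hs, he⟩ := hv
  have hiL : i < v.length := by have := hs.1; omega
  have hrow : (v.getD i []).length = (a.headD []).length + 2 := pvShape_row v _ _ hs i hiL
  have hjL : j < (v.getD i []).length := by omega
  unfold pvStep1
  rw [show ((i:Int) - 1) = ((i-1:Nat):Int) by omega, show ((j:Int) - 1) = ((j-1:Nat):Int) by omega,
    pvGet2_natCast, pvGet2_natCast, pvGet2_natCast, pvSet2_natCast]
  have e1 : pvG v (i-1) j = pvEnc (pvR1 a (i-1) j) := by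
    rw [he (i-1) j (by omega) (by omega), if_neg (by omega)]
  have e2 : pvG v i (j-1) = pvEnc (pvR1 a i (j-1)) := by
    rw [he i (j-1) (by omega) (by omega), if_neg (by omega)]
  rw [e1, e2, pvOr_enc, pvAnd_enc, ← pvR1_interior a i j h1 h2 h3 h4]
  refine ⟨pvShape_set v _ _ hs i j _, ?_⟩
  intro r c hr hc
  rw [pvG_set v i j _ r c hiL hjL]
  by_cases hrc : r = i ∧ c = j
  · rw [if_pos hrc]
    obtain ⟨hr', hc'⟩ := hrc
    subst hr'; subst hc'
    rw [if_neg (by omega)]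
  · rw [if_neg hrc, he r c hr hc]
    refine if_congr ?_ rfl rfl
    constructor <;> rintro ⟨a1, a2, a3, a4, a5⟩ <;> exact ⟨a1, a2, a3, a4, by omega⟩

theorem pvInv1_shift (a v : List (List Int)) (i : Nat)
    (hv : pvInv1 a v i (a.headD []).length) : pvInv1 a v (i+1) 0 := by
  obtain ⟨hs, he⟩ := hv
  refine ⟨hs, ?_⟩
  intro r c hr hc
  rw [he r c hr hc]
  have : (1 ≤ r ∧ r ≤ a.length ∧ 1 ≤ c ∧ c ≤ (a.headD []).length ∧
      ¬ (r < i ∨ (r = i ∧ c ≤ (a.headD []).length))) ↔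
      (1 ≤ r ∧ r ≤ a.length ∧ 1 ≤ c ∧ c ≤ (a.headD []).length ∧ ¬ (r < i+1 ∨ (r = i+1 ∧ c ≤ 0))) := by
    constructor <;> rintro ⟨a1, a2, a3, a4, a5⟩ <;> exact ⟨a1, a2, a3, a4, by omega⟩
  rw [if_congr this rfl rfl]

theorem pvInner1 (a : List (List Int)) (i : Nat) (h1 : 1 ≤ i) (h2 : i ≤ a.length) :
    ∀ t, t ≤ (a.headD []).length → ∀ v, pvInv1 a v i 0 →
    pvInv1 a ((List.range t).foldl (fun v (k : Nat) => pvStep1 a v (i:Int) (1 + (k:Int))) v) i t := by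
  intro t
  induction t with
  | zero => intro _ v hv; simpa using hv
  | succ t ih =>
    intro ht v hv
    rw [List.range_succ, List.foldl_append, List.foldl_cons, List.foldl_nil]
    rw [show (1 + (t:Int)) = ((t+1:Nat):Int) by push_cast; ring]
    have := pvInv1_step a _ i (t+1) h1 h2 (by omega) (by omega)
      (by simpa using ih (by omega) v hv)
    simpa using this

theorem pvOuter1 (a : List (List Int)) :
    ∀ t, t ≤ a.length → ∀ v, pvInv1 a v 1 0 →
    pvInv1 a ((List.range t).foldl (fun v (k : Nat) => (List.range (a.headD []).length).foldl
      (fun v (k2 : Nat) => pvStep1 a v (1 + (k:Int)) (1 + (k2:Int))) v) v) (t+1) 0 := by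
  intro t
  induction t with
  | zero => intro _ v hv; simpa using hv
  | succ t ih =>
    intro ht v hv
    rw [List.range_succ, List.foldl_append, List.foldl_cons, List.foldl_nil]
    simp only [show (1 + (t:Int)) = ((t+1:Nat):Int) by push_cast; ring]
    apply pvInv1_shift
    exact pvInner1 a (t+1) (by omega) (by omega) _ le_rfl _ (ih (by omega) v hv)

theorem pvGetD_set_int (cnt : List Int) (k d : Nat) (x : Int) (hk : k < cnt.length) :
    (cnt.set k x).getD d 0 = if d = k then x else cnt.getD d 0 := by
  simp only [List.getD_eq_getElem?_getD, List.getElem?_set]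
  by_cases h : k = d
  · subst h; simp [hk]
  · rw [if_neg h, if_neg (by omega : ¬ d = k)]

theorem pvInit1 (a : List (List Int)) :
    pvInv1 a (pvSet2 ((PySem.List.pyRange 0 (((a.length:Int))+2) 1).map
      (fun _ => (PySem.List.pyRange 0 ((((a.headD []).length:Int))+2) 1).map (fun _ => (0:Int))))
      0 1 1) 1 0 := by
  set M := a.length with hM
  set N := (a.headD []).length with hN
  set T0 : List (List Int) := (PySem.List.pyRange 0 (((M:Int))+2) 1).map
      (fun _ => (PySem.List.pyRange 0 (((N:Int))+2) 1).map (fun _ => (0:Int))) with hT0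
  have hT0shape : pvShape T0 M N := by
    constructor
    · simp [hT0, PySem.List.length_pyRange_one]
      omega
    · intro r hr
      rw [hT0] at hr
      obtain ⟨_, _, rfl⟩ := List.mem_map.mp hr
      simp [PySem.List.length_pyRange_one]
      omega
  have hrow0 : ∀ row ∈ T0, ∀ c : Nat, row.getD c 0 = 0 := by
    intro row hrow c
    rw [hT0] at hrow
    obtain ⟨_, _, rfl⟩ := List.mem_map.mp hrow
    rw [List.getD_eq_getElem?_getD, List.getElem?_map]
    cases h2 : (PySem.List.pyRange 0 (((N:Int))+2) 1)[c]? <;> simp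
  have hT0G : ∀ r c : Nat, pvG T0 r c = 0 := by
    intro r c
    have hcase : T0.getD r [] = [] ∨ T0.getD r [] ∈ T0 := by
      by_cases hr : r < T0.length
      · right
        simp only [List.getD_eq_getElem?_getD, List.getElem?_eq_getElem hr, Option.getD_some]
        exact List.getElem_mem hr
      · left
        rw [List.getD_eq_getElem?_getD, List.getElem?_eq_none (by omega)]
        rfl
    unfold pvG
    rcases hcase with h | h
    · rw [h]
      rfl
    · exact hrow0 _ h c
  have h0L : 0 < T0.length := by have := hT0shape.1; omega
  have h1L : 1 < (T0.getD 0 []).length := by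
    rw [pvShape_row T0 M N hT0shape 0 h0L]; omega
  rw [show (0:Int) = ((0:Nat):Int) from rfl, show (1:Int) = ((1:Nat):Int) from rfl, pvSet2_natCast]
  refine ⟨pvShape_set T0 M N hT0shape 0 1 _, ?_⟩
  intro r c hr hc
  rw [pvG_set T0 0 1 _ r c h0L h1L, hT0G r c]
  by_cases h01 : r = 0 ∧ c = 1
  · obtain ⟨rfl, rfl⟩ := h01
    rw [if_pos ⟨rfl, rfl⟩, if_neg (by omega)]
    simp [pvR1_zero, pvEnc]
  · rw [if_neg h01]
    by_cases hint : 1 ≤ r ∧ r ≤ M ∧ 1 ≤ c ∧ c ≤ N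
    · rw [if_pos ⟨hint.1, hint.2.1, hint.2.2.1, hint.2.2.2, by omega⟩]
    · rw [if_neg (by omega)]
      by_cases hr0 : r = 0
      · subst hr0
        rw [pvR1_zero]
        have : (c == 1) = false := by simp; omega
        rw [this]; rfl
      · rw [pvR1_out a r c ⟨hr0, by omega⟩]; rfl

-- ---- A, second double loop ----

theorem pvCpart_step (a : List (List Int)) (i j d : Nat) (h1 : 1 ≤ i) (h2 : i ≤ a.length)
    (h3 : 1 ≤ j) (h4 : j ≤ (a.headD []).length) :
    pvCpart a i (j-1) d = if d = i+j-2 then pvCpart a i j d + pvW a i j else pvCpart a i j d := by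
  unfold pvCpart
  by_cases hd : d = i+j-2
  · rw [if_pos hd]
    have e1 : pvRowCp a i (j-1) d = pvW a i j := by
      unfold pvRowCp
      rw [if_pos (by omega), show d+2-i = j by omega]
    have e2 : pvRowCp a i j d = 0 := by
      unfold pvRowCp
      rw [if_neg (by omega)]
    rw [e1, e2]; ring
  · rw [if_neg hd]
    have : pvRowCp a i (j-1) d = pvRowCp a i j d := by
      unfold pvRowCp
      by_cases hcnd : 1 ≤ i ∧ i ≤ a.length ∧ i ≤ d+1 ∧ d+2 ≤ (a.headD []).length + i ∧ j-1 < d+2-i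
      · rw [if_pos hcnd, if_pos ⟨hcnd.1, hcnd.2.1, hcnd.2.2.1, hcnd.2.2.2.1, by omega⟩]
      · rw [if_neg hcnd, if_neg (by omega)]
    rw [this]

theorem pvInv2_step (a w v : List (List Int)) (cnt : List Int) (i j : Nat)
    (h1 : 1 ≤ i) (h2 : i ≤ a.length) (h3 : 1 ≤ j) (h4 : j ≤ (a.headD []).length)
    (hw : ∀ r c : Nat, r ≤ a.length + 1 → c ≤ (a.headD []).length + 1 →
      pvG w r c = pvEnc (pvR1 a r c))
    (hv : pvInv2 a v cnt i j) :
    pvInv2 a (pvStep2 a w (v, cnt) (i:Int) (j:Int)).1 (pvStep2 a w (v, cnt) (i:Int) (j:Int)).2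
      i (j-1) := by
  obtain ⟨hs, he, hl, hc⟩ := hv
  have hiL : i < v.length := by have := hs.1; omega
  have hrow : (v.getD i []).length = (a.headD []).length + 2 := pvShape_row v _ _ hs i hiL
  have hjL : j < (v.getD i []).length := by omega
  have hidx : i + j - 2 < cnt.length := by omega
  unfold pvStep2
  simp only
  rw [show ((i:Int) - 1) = ((i-1:Nat):Int) by omega, show ((j:Int) - 1) = ((j-1:Nat):Int) by omega,
    show ((i:Int) + 1) = ((i+1:Nat):Int) by omega, show ((j:Int) + 1) = ((j+1:Nat):Int) by omega,
    show ((i:Int) + (j:Int) - 2) = ((i+j-2:Nat):Int) by omega,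
    pvGet2_natCast, pvGet2_natCast, pvGet2_natCast, pvGet2_natCast, pvGet2_natCast,
    pvSet2_natCast, PySem.List.pySetD_natCast, PySem.List.pyGetD_natCast]
  have e1 : pvG v (i+1) j = pvEnc (pvR2 a (i+1) j) := by
    rw [he (i+1) j (by omega) (by omega), if_neg (by omega)]
  have e2 : pvG v i (j+1) = pvEnc (pvR2 a i (j+1)) := by
    rw [he i (j+1) (by omega) (by omega), if_neg (by omega)]
  rw [e1, e2, pvOr_enc, pvAnd_enc, ← pvR2_interior a i j h1 h2 h3 h4]
  have ew : pvG w i j = pvEnc (pvR1 a i j) := hw i j (by omega) (by omega)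
  have ev2 : pvG (v.set i ((v.getD i []).set j (pvEnc (pvR2 a i j)))) i j = pvEnc (pvR2 a i j) := by
    rw [pvG_set v i j _ i j hiL hjL, if_pos ⟨rfl, rfl⟩]
  rw [ew, ev2, pvAnd_enc_enc]
  refine ⟨pvShape_set v _ _ hs i j _, ?_, by simpa using hl, ?_⟩
  · intro r c hr hc'
    rw [pvG_set v i j _ r c hiL hjL]
    by_cases hrc : r = i ∧ c = j
    · obtain ⟨rfl, rfl⟩ := hrc
      rw [if_pos ⟨rfl, rfl⟩, if_neg (by omega)]
    · rw [if_neg hrc, he r c hr hc']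
      refine if_congr ?_ rfl rfl
      constructor <;> rintro ⟨a1, a2, a3, a4, a5⟩ <;> exact ⟨a1, a2, a3, a4, by omega⟩
  · intro d hd
    rw [pvGetD_set_int cnt (i+j-2) d _ hidx]
    by_cases hdd : d = i+j-2
    · rw [if_pos hdd, hc (i+j-2) (by omega), pvCpart_step a i j d h1 h2 h3 h4, if_pos hdd, hdd]
      rfl
    · rw [if_neg hdd, hc d hd, pvCpart_step a i j d h1 h2 h3 h4, if_neg hdd]

theorem pvInv2_shift (a v : List (List Int)) (cnt : List Int) (i : Nat) (h1 : 1 ≤ i)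
    (h2 : i ≤ a.length) (hv : pvInv2 a v cnt i 0) :
    pvInv2 a v cnt (i-1) (a.headD []).length := by
  obtain ⟨hs, he, hl, hc⟩ := hv
  refine ⟨hs, ?_, hl, ?_⟩
  · intro r c hr hc'
    rw [he r c hr hc']
    refine if_congr ?_ rfl rfl
    constructor <;> rintro ⟨a1, a2, a3, a4, a5⟩ <;> exact ⟨a1, a2, a3, a4, by omega⟩
  · intro d hd
    rw [hc d hd]
    unfold pvCpart
    have hrange : a.length - (i-1) = (a.length - i) + 1 := by omega
    rw [hrange, List.range_succ, List.map_append, List.sum_append]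
    simp only [List.map_cons, List.map_nil, List.sum_cons, List.sum_nil]
    have e1 : pvRowCp a i 0 d = pvRowC a i d := by
      unfold pvRowCp pvRowC
      by_cases hcnd : 1 ≤ i ∧ i ≤ a.length ∧ i ≤ d+1 ∧ d+2 ≤ (a.headD []).length + i
      · rw [if_pos ⟨hcnd.1, hcnd.2.1, hcnd.2.2.1, hcnd.2.2.2, by omega⟩, if_pos hcnd]
      · rw [if_neg (by omega), if_neg hcnd]
    have e2 : pvRowCp a (i-1) (a.headD []).length d = 0 := by
      unfold pvRowCp
      rw [if_neg (by omega)]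
    have e3 : a.length - (a.length - i) = i := by omega
    rw [e1, e2, e3]
    ring

theorem pvInner2 (a w : List (List Int)) (i : Nat) (h1 : 1 ≤ i) (h2 : i ≤ a.length)
    (hw : ∀ r c : Nat, r ≤ a.length + 1 → c ≤ (a.headD []).length + 1 →
      pvG w r c = pvEnc (pvR1 a r c)) :
    ∀ t, t ≤ (a.headD []).length → ∀ st : List (List Int) × List Int,
    pvInv2 a st.1 st.2 i (a.headD []).length →
    pvInv2 a ((List.range t).foldl (fun st (k : Nat) =>
        pvStep2 a w st (i:Int) (((a.headD []).length:Int) - (k:Int))) st).1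
      ((List.range t).foldl (fun st (k : Nat) =>
        pvStep2 a w st (i:Int) (((a.headD []).length:Int) - (k:Int))) st).2
      i ((a.headD []).length - t) := by
  intro t
  induction t with
  | zero => intro _ st hv; simpa using hv
  | succ t ih =>
    intro ht st hv
    rw [List.range_succ, List.foldl_append, List.foldl_cons, List.foldl_nil]
    rw [show (((a.headD []).length:Int) - (t:Int)) = (((a.headD []).length - t : Nat):Int) by omega]
    have prev := ih (by omega) st hv
    set P := (List.range t).foldl (fun st (k : Nat) =>
        pvStep2 a w st (i:Int) (((a.headD []).length:Int) - (k:Int))) st with hP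
    have step := pvInv2_step a w P.1 P.2 i ((a.headD []).length - t) h1 h2 (by omega) (by omega)
      hw prev
    rw [Prod.mk.eta] at step
    rw [show (a.headD []).length - t - 1 = (a.headD []).length - (t+1) by omega] at step
    exact step

theorem pvOuter2 (a w : List (List Int))
    (hw : ∀ r c : Nat, r ≤ a.length + 1 → c ≤ (a.headD []).length + 1 →
      pvG w r c = pvEnc (pvR1 a r c)) :
    ∀ t, t ≤ a.length → ∀ st : List (List Int) × List Int,
    pvInv2 a st.1 st.2 a.length (a.headD []).length →
    pvInv2 a ((List.range t).foldl (fun st (k : Nat) => (List.range (a.headD []).length).foldl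
        (fun st (k2 : Nat) => pvStep2 a w st ((a.length:Int) - (k:Int))
          (((a.headD []).length:Int) - (k2:Int))) st) st).1
      ((List.range t).foldl (fun st (k : Nat) => (List.range (a.headD []).length).foldl
        (fun st (k2 : Nat) => pvStep2 a w st ((a.length:Int) - (k:Int))
          (((a.headD []).length:Int) - (k2:Int))) st) st).2
      (a.length - t) (a.headD []).length := by
  intro t
  induction t with
  | zero => intro _ st hv; simpa using hv
  | succ t ih =>
    intro ht st hv
    rw [List.range_succ, List.foldl_append, List.foldl_cons, List.foldl_nil]
    simp only [show ((a.length:Int) - (t:Int)) = ((a.length - t : Nat):Int) by omega]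
    have inner := pvInner2 a w (a.length - t) (by omega) (by omega) hw
      (a.headD []).length le_rfl _ (ih (by omega) st hv)
    simp only [Nat.sub_self] at inner
    have := pvInv2_shift a _ _ (a.length - t) (by omega) (by omega) inner
    rw [show a.length - t - 1 = a.length - (t+1) by omega] at this
    exact this

theorem pvInit2 (a : List (List Int)) (hm : 1 ≤ a.length) (hn : 1 ≤ (a.headD []).length) :
    pvInv2 a
      (pvSet2 ((PySem.List.pyRange 0 (((a.length:Int))+2) 1).map
        (fun _ => (PySem.List.pyRange 0 ((((a.headD []).length:Int))+2) 1).map (fun _ => (0:Int))))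
        (a.length:Int) (((a.headD []).length:Int)+1) 1)
      (List.replicate (a.length + (a.headD []).length - 1) (0:Int))
      a.length (a.headD []).length := by
  set M := a.length with hM
  set N := (a.headD []).length with hN
  set T0 : List (List Int) := (PySem.List.pyRange 0 (((M:Int))+2) 1).map
      (fun _ => (PySem.List.pyRange 0 (((N:Int))+2) 1).map (fun _ => (0:Int))) with hT0
  have hT0shape : pvShape T0 M N := by
    constructor
    · simp [hT0, PySem.List.length_pyRange_one]
      omega
    · intro r hr
      rw [hT0] at hr
      obtain ⟨_, _, rfl⟩ := List.mem_map.mp hr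
      simp [PySem.List.length_pyRange_one]
      omega
  have hrow0 : ∀ row ∈ T0, ∀ c : Nat, row.getD c 0 = 0 := by
    intro row hrow c
    rw [hT0] at hrow
    obtain ⟨_, _, rfl⟩ := List.mem_map.mp hrow
    rw [List.getD_eq_getElem?_getD, List.getElem?_map]
    cases h2 : (PySem.List.pyRange 0 (((N:Int))+2) 1)[c]? <;> simp
  have hT0G : ∀ r c : Nat, pvG T0 r c = 0 := by
    intro r c
    have hcase : T0.getD r [] = [] ∨ T0.getD r [] ∈ T0 := by
      by_cases hr : r < T0.length
      · right
        simp only [List.getD_eq_getElem?_getD, List.getElem?_eq_getElem hr, Option.getD_some]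
        exact List.getElem_mem hr
      · left
        rw [List.getD_eq_getElem?_getD, List.getElem?_eq_none (by omega)]
        rfl
    unfold pvG
    rcases hcase with h | h
    · rw [h]
      rfl
    · exact hrow0 _ h c
  have hML : M < T0.length := by have := hT0shape.1; omega
  have hNL : N+1 < (T0.getD M []).length := by
    rw [pvShape_row T0 M N hT0shape M hML]; omega
  rw [show (((N:Int))+1) = (((N+1:Nat)):Int) by omega, pvSet2_natCast]
  refine ⟨pvShape_set T0 M N hT0shape M (N+1) _, ?_, by rw [List.length_replicate], ?_⟩
  · intro r c hr hc
    rw [pvG_set T0 M (N+1) _ r c hML hNL, hT0G r c]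
    by_cases hb : r = M ∧ c = N+1
    · obtain ⟨rfl, rfl⟩ := hb
      rw [if_pos ⟨rfl, rfl⟩, if_neg (by omega), pvR2_base]
      rfl
    · rw [if_neg hb]
      by_cases hint : 1 ≤ r ∧ r ≤ M ∧ 1 ≤ c ∧ c ≤ N
      · rw [if_pos ⟨hint.1, hint.2.1, hint.2.2.1, hint.2.2.2, by omega⟩]
      · rw [if_neg (by omega), pvR2_out a r c (by omega) (by omega)]
        rfl
  · intro d hd
    rw [List.getD_eq_getElem?_getD, List.getElem?_replicate]
    rw [if_pos (by omega : d < M + N - 1)]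
    unfold pvCpart
    rw [Nat.sub_self]
    simp only [List.range_zero, List.map_nil, List.sum_nil, zero_add]
    unfold pvRowCp
    rw [if_neg (by omega)]
    rfl

theorem pvFinal1 (a v : List (List Int)) (hv : pvInv1 a v (a.length + 1) 0) :
    ∀ r c : Nat, r ≤ a.length + 1 → c ≤ (a.headD []).length + 1 →
      pvG v r c = pvEnc (pvR1 a r c) := by
  intro r c hr hc
  rw [hv.2 r c hr hc, if_neg (by omega)]

theorem pvSumRev (a : List (List Int)) (d : Nat) :
    ((List.range a.length).map (fun k => pvRowC a (a.length - k) d)).sum = pvDiagSum a d := by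
  unfold pvDiagSum
  rw [← List.sum_reverse]
  congr 1
  apply List.ext_getElem
  · simp
  · intro i h1 h2
    have hi : i < a.length := by simpa using h1
    rw [List.getElem_reverse]
    simp only [List.getElem_map, List.getElem_range, List.length_map, List.length_range]
    congr 1
    omega

theorem pvFinal2 (a v : List (List Int)) (cnt : List Int)
    (hv : pvInv2 a v cnt 0 (a.headD []).length) :
    ∀ d : Nat, d < a.length + (a.headD []).length - 1 → cnt.getD d 0 = pvDiagSum a d := by
  intro d hd
  rw [hv.2.2.2 d hd]
  unfold pvCpart
  rw [Nat.sub_zero]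
  have : pvRowCp a 0 (a.headD []).length d = 0 := by
    unfold pvRowCp
    rw [if_neg (by omega)]
  rw [this, add_zero, pvSumRev]

-- A's result, characterised by the diagonal sums
theorem pvA_char (a : List (List Int)) (hm : 1 ≤ a.length) (hn : 1 ≤ (a.headD []).length) :
    isPossibleToCutPath a =
      (PySem.List.pyRange 1 ((((a.headD []).length:Int)) + ((a.length:Int)) - 2) 1).any
        (fun x => decide (pvDiagSum a x.toNat < 2)) := by
  unfold isPossibleToCutPath
  simp only [pvHead]
  rw [PySem.List.pyRepeat_singleton,
    show ((a.length:Int) + ((a.headD []).length:Int) - 1).toNat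
      = a.length + (a.headD []).length - 1 by omega,
    PySem.List.pyRange_one 1 ((a.length:Int)+1),
    show ((a.length:Int)+1-1).toNat = a.length by omega,
    PySem.List.pyRange_one 1 (((a.headD []).length:Int)+1),
    show (((a.headD []).length:Int)+1-1).toNat = (a.headD []).length by omega,
    PySem.List.pyRange_neg_one (a.length:Int) 0,
    show ((a.length:Int)-0).toNat = a.length by omega,
    PySem.List.pyRange_neg_one ((a.headD []).length:Int) 0,
    show (((a.headD []).length:Int)-0).toNat = (a.headD []).length by omega]
  simp only [List.foldl_map]
  have H1 := pvOuter1 a a.length le_rfl _ (pvInit1 a)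
  have hw := pvFinal1 a _ H1
  have H2 := pvOuter2 a _ hw a.length le_rfl
    ((pvSet2 ((PySem.List.pyRange 0 (((a.length:Int))+2) 1).map
        (fun _ => (PySem.List.pyRange 0 ((((a.headD []).length:Int))+2) 1).map (fun _ => (0:Int))))
        (a.length:Int) (((a.headD []).length:Int)+1) 1),
     (List.replicate (a.length + (a.headD []).length - 1) (0:Int)))
    (pvInit2 a hm hn)
  rw [Nat.sub_self] at H2
  have hcnt := pvFinal2 a _ _ H2
  apply PySem.List.any_congr_mem
  intro x hx
  rw [PySem.List.mem_pyRange_one] at hx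
  obtain ⟨k, rfl⟩ := Int.eq_ofNat_of_zero_le (by omega : (0:Int) ≤ x)
  have hk : k < a.length + (a.headD []).length - 1 := by omega
  rw [PySem.List.pyGetD_natCast, hcnt k hk, Int.toNat_natCast]

-- ---- doubly-reachable cells: bounds, predecessors, the root ----

theorem pvBR_bounds (a : List (List Int)) (r c : Nat) (h : pvBR a r c = true) :
    r < a.length ∧ c < (a.headD []).length := by
  by_contra hcon
  have h1 : pvR1 a (r+1) (c+1) = false := pvR1_out a (r+1) (c+1) ⟨by omega, Or.inr (by omega)⟩
  unfold pvBR at h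
  rw [h1] at h
  simp at h

theorem pvBR_pred (a : List (List Int)) (r c : Nat) (h0 : ¬(r = 0 ∧ c = 0))
    (h : pvBR a r c = true) :
    (0 < r ∧ pvBR a (r-1) c = true) ∨ (0 < c ∧ pvBR a r (c-1) = true) := by
  obtain ⟨hr, hc⟩ := pvBR_bounds a r c h
  unfold pvBR at h
  obtain ⟨hR1, hR2⟩ := Bool.and_eq_true_iff.mp h
  rw [pvR1_interior a (r+1) (c+1) (by omega) (by omega) (by omega) (by omega)] at hR1
  simp only [Nat.add_sub_cancel] at hR1
  obtain ⟨_, hpre⟩ := Bool.and_eq_true_iff.mp hR1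
  rcases Bool.or_eq_true_iff.mp hpre with hup | hleft
  · -- predecessor above: table (r, c+1), cell (r-1, c)
    left
    have hrpos : 0 < r := by
      by_contra hr0
      have : r = 0 := by omega
      subst this
      rw [pvR1_zero] at hup
      have : c = 0 := by simpa using hup
      exact h0 ⟨rfl, this⟩
    refine ⟨hrpos, ?_⟩
    unfold pvBR
    rw [show r - 1 + 1 = r by omega]
    have hR2p : pvR2 a r (c+1) = true := by
      rw [pvR2_interior a r (c+1) (by omega) (by omega) (by omega) (by omega)]
      simp only [Nat.add_sub_cancel]
      have ha : pvG a (r-1) c != 0 := by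
        rw [pvR1_interior a r (c+1) (by omega) (by omega) (by omega) (by omega)] at hup
        simp only [Nat.add_sub_cancel] at hup
        exact (Bool.and_eq_true_iff.mp hup).1
      rw [ha, hR2]
      simp
    rw [hup, hR2p]
    rfl
  · -- predecessor to the left: table (r+1, c), cell (r, c-1)
    right
    have hcpos : 0 < c := by
      by_contra hc0
      have : c = 0 := by omega
      subst this
      rw [pvR1_out a (r+1) 0 ⟨by omega, Or.inl rfl⟩] at hleft
      exact absurd hleft Bool.false_ne_true
    refine ⟨hcpos, ?_⟩
    unfold pvBR
    rw [show c - 1 + 1 = c by omega]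
    have hR2p : pvR2 a (r+1) c = true := by
      rw [pvR2_interior a (r+1) c (by omega) (by omega) (by omega) (by omega)]
      simp only [Nat.add_sub_cancel]
      have ha : pvG a r (c-1) != 0 := by
        rw [pvR1_interior a (r+1) c (by omega) (by omega) (by omega) (by omega)] at hleft
        simp only [Nat.add_sub_cancel] at hleft
        exact (Bool.and_eq_true_iff.mp hleft).1
      rw [ha, hR2]
      simp
    rw [hleft, hR2p]
    rfl

theorem pvBR_root_aux (a : List (List Int)) :
    ∀ s r c, r + c ≤ s → pvBR a r c = true → pvR2 a 1 1 = true := by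
  intro s
  induction s with
  | zero =>
    intro r c hs h
    have hr : r = 0 := by omega
    have hc : c = 0 := by omega
    subst hr; subst hc
    exact (Bool.and_eq_true_iff.mp h).2
  | succ s ih =>
    intro r c hs h
    by_cases h0 : r = 0 ∧ c = 0
    · obtain ⟨rfl, rfl⟩ := h0
      exact (Bool.and_eq_true_iff.mp h).2
    · rcases pvBR_pred a r c h0 h with ⟨hr, hp⟩ | ⟨hc, hp⟩
      · exact ih (r-1) c (by omega) hp
      · exact ih r (c-1) (by omega) hp

theorem pvBR_none (a : List (List Int)) (hR2 : pvR2 a 1 1 ≠ true) (r c : Nat) :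
    pvBR a r c = false := by
  by_contra hcon
  exact hR2 (pvBR_root_aux a (r+c) r c le_rfl (by revert hcon; cases pvBR a r c <;> simp))

-- ---- diagonal sums vs pvBR ----

theorem pvSumFinset (f : Nat → Int) (M : Nat) :
    ((List.range M).map f).sum = ∑ k ∈ Finset.range M, f k := by
  induction M with
  | zero => simp
  | succ M ih => rw [List.range_succ, List.map_append, List.sum_append, Finset.sum_range_succ, ih]; simp

theorem pvRowC_nonneg (a : List (List Int)) (r d : Nat) : 0 ≤ pvRowC a r d := by
  unfold pvRowC pvW pvEnc
  split_ifs <;> simp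

theorem pvRowC_mem (a : List (List Int)) (k d : Nat) (hk : k < a.length) (hkd : k ≤ d)
    (hdk : d - k < (a.headD []).length) :
    pvRowC a (k+1) d = pvEnc (pvBR a k (d-k)) := by
  unfold pvRowC
  rw [if_pos (by omega)]
  unfold pvW pvBR
  rw [show d + 2 - (k+1) = (d-k) + 1 by omega]

theorem pvRowC_off (a : List (List Int)) (k d : Nat)
    (h : ¬(k < a.length ∧ k ≤ d ∧ d - k < (a.headD []).length)) :
    pvRowC a (k+1) d = 0 := by
  unfold pvRowC
  rw [if_neg (by omega)]

theorem pvDiagSum_eq_one (a : List (List Int)) (d i : Nat) (hi : i < a.length) (hid : i ≤ d)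
    (hdi : d - i < (a.headD []).length) (hbr : pvBR a i (d-i) = true)
    (huniq : ∀ k, k < a.length → k ≤ d → d - k < (a.headD []).length →
      pvBR a k (d-k) = true → k = i) :
    pvDiagSum a d = 1 := by
  unfold pvDiagSum
  rw [pvSumFinset]
  rw [show (1:Int) = ∑ k ∈ Finset.range a.length, (if k = i then (1:Int) else 0) by
    rw [Finset.sum_ite_eq' (Finset.range a.length) i (fun _ => (1:Int))]
    rw [if_pos (Finset.mem_range.mpr hi)]]
  apply Finset.sum_congr rfl
  intro k _
  by_cases hki : k = i
  · subst hki
    rw [if_pos rfl, pvRowC_mem a k d hi hid hdi, hbr]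
    rfl
  · rw [if_neg hki]
    by_cases hcnd : k < a.length ∧ k ≤ d ∧ d - k < (a.headD []).length
    · rw [pvRowC_mem a k d hcnd.1 hcnd.2.1 hcnd.2.2]
      have : pvBR a k (d-k) = false := by
        by_contra hcon
        exact hki (huniq k hcnd.1 hcnd.2.1 hcnd.2.2
          (by revert hcon; cases pvBR a k (d-k) <;> simp))
      rw [this]
      rfl
    · exact pvRowC_off a k d hcnd

theorem pvDiagSum_ge_two (a : List (List Int)) (d i l : Nat) (hil : i ≠ l)
    (hi : i < a.length) (hid : i ≤ d) (hdi : d - i < (a.headD []).length)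
    (hbri : pvBR a i (d-i) = true)
    (hl : l < a.length) (hld : l ≤ d) (hdl : d - l < (a.headD []).length)
    (hbrl : pvBR a l (d-l) = true) :
    2 ≤ pvDiagSum a d := by
  unfold pvDiagSum
  rw [pvSumFinset]
  have hsub : ({i, l} : Finset Nat) ⊆ Finset.range a.length := by
    intro x hx
    rcases Finset.mem_insert.mp hx with rfl | hx
    · exact Finset.mem_range.mpr hi
    · rw [Finset.mem_singleton.mp hx]
      exact Finset.mem_range.mpr hl
  have hpair : ∑ k ∈ ({i, l} : Finset Nat), pvRowC a (k+1) d = 2 := by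
    rw [Finset.sum_pair hil, pvRowC_mem a i d hi hid hdi, pvRowC_mem a l d hl hld hdl,
      hbri, hbrl]
    rfl
  calc (2:Int) = ∑ k ∈ ({i, l} : Finset Nat), pvRowC a (k+1) d := hpair.symm
    _ ≤ ∑ k ∈ Finset.range a.length, pvRowC a (k+1) d :=
        Finset.sum_le_sum_of_subset_of_nonneg hsub (fun k _ _ => pvRowC_nonneg a (k+1) d)

theorem pvDiagSum_zero (a : List (List Int)) (hR2 : pvR2 a 1 1 ≠ true) (d : Nat) :
    pvDiagSum a d = 0 := by
  unfold pvDiagSum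
  apply List.sum_eq_zero
  intro x hx
  obtain ⟨k, _, rfl⟩ := List.mem_map.mp hx
  by_cases hcnd : k < a.length ∧ k ≤ d ∧ d - k < (a.headD []).length
  · rw [pvRowC_mem a k d hcnd.1 hcnd.2.1 hcnd.2.2, pvBR_none a hR2]
    rfl
  · exact pvRowC_off a k d hcnd

-- ---- B, reverse scan: the good table computes pvR2 ----

theorem pvInvG_step (a : List (List Int)) (g : List (List Bool)) (i j : Nat)
    (hi : i < a.length) (hj : j < (a.headD []).length) (hg : pvInvG a g i (j+1)) :
    pvInvG a (pvGStep a (a.length:Int) ((a.headD []).length:Int) g (i:Int) (j:Int)) i j := by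
  obtain ⟨hlen, hrows, he⟩ := hg
  set M := a.length with hM
  set N := (a.headD []).length with hN
  have hgiL : i < g.length := by omega
  have hrowlen : (g.getD i []).length = N := by
    apply hrows
    rw [List.getD_eq_getElem?_getD, List.getElem?_eq_getElem hgiL]
    exact List.getElem_mem hgiL
  have hgjL : j < (g.getD i []).length := by omega
  -- the value pvR2 of cell (i,j), via the interior unfolding
  have hvalR2 : ∀ hopen : pvG a i j ≠ 0,
      pvR2 a (i+1) (j+1) = (((i:Int) == (M:Int)-1 && (j:Int) == (N:Int)-1)
        || (decide ((i:Int)+1 < (M:Int)) && pvGoodAt g (i+1) j)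
        || (decide ((j:Int)+1 < (N:Int)) && pvGoodAt g i (j+1))) := by
    intro hopen
    rw [pvR2_interior a (i+1) (j+1) (by omega) (by omega) (by omega) (by omega)]
    simp only [Nat.add_sub_cancel]
    have hopen' : (pvG a i j != 0) = true := by simpa using hopen
    rw [hopen']
    by_cases ht : i = M - 1 ∧ j = N - 1
    · -- the exit cell: down is out, right is the seed
      obtain ⟨hti, htj⟩ := ht
      have e1 : ((i:Int) == (M:Int)-1 && (j:Int) == (N:Int)-1) = true := by
        simp only [Bool.and_eq_true, beq_iff_eq]
        omega
      have e2 : pvR2 a (i+1+1) (j+1) = false := pvR2_out a (i+2) (j+1) (by omega) (by omega)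
      have e3 : pvR2 a (i+1) (j+1+1) = true := by
        rw [show i+1 = M by omega, show j+1+1 = N+1 by omega]
        exact pvR2_base a
      rw [e1, e2, e3]
      simp
    · have e1 : ((i:Int) == (M:Int)-1 && (j:Int) == (N:Int)-1) = false := by
        simp only at *
        by_contra hcon
        rw [Bool.not_eq_false, Bool.and_eq_true, beq_iff_eq, beq_iff_eq] at hcon
        exact ht ⟨by omega, by omega⟩
      rw [e1, Bool.false_or]
      have e2 : (decide ((i:Int)+1 < (M:Int)) && pvGoodAt g (i+1) j) = pvR2 a (i+1+1) (j+1) := by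
        by_cases hdn : i+1 < M
        · rw [decide_eq_true (by omega : ((i:Int)+1 < (M:Int))), Bool.true_and,
            he (i+1) j (by omega) hj, if_pos (Or.inl (by omega))]
        · have : pvR2 a (i+1+1) (j+1) = false := pvR2_out a (i+2) (j+1) (by omega) (by omega)
          rw [this, decide_eq_false (by omega : ¬((i:Int)+1 < (M:Int)))]
          simp
      have e3 : (decide ((j:Int)+1 < (N:Int)) && pvGoodAt g i (j+1)) = pvR2 a (i+1) (j+1+1) := by
        by_cases hrt : j+1 < N
        · rw [decide_eq_true (by omega : ((j:Int)+1 < (N:Int))), Bool.true_and,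
            he i (j+1) hi (by omega), if_pos (Or.inr ⟨rfl, by omega⟩)]
        · have : pvR2 a (i+1) (j+1+1) = false := by
            apply pvR2_out a (i+1) (j+2)
            · intro hcon
              exact ht ⟨by omega, by omega⟩
            · omega
          rw [this, decide_eq_false (by omega : ¬((j:Int)+1 < (N:Int)))]
          simp
      rw [e2, e3, Bool.true_and]
  unfold pvGStep
  by_cases hopen : pvGet2 a (i:Int) (j:Int) ≠ 0
  · rw [if_pos hopen]
    rw [pvGet2_natCast] at hopen
    rw [show ((i:Int)+1) = ((i+1:Nat):Int) by omega, show ((j:Int)+1) = ((j+1:Nat):Int) by omega,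
      pvGoodGet_natCast, pvGoodGet_natCast, pvGoodSet_natCast]
    refine ⟨by simpa using hlen, ?_, ?_⟩
    · intro r hr
      rcases List.mem_or_eq_of_mem_set hr with hmem | heq
      · exact hrows r hmem
      · subst heq
        simp only [List.length_set]
        exact hrowlen
    · intro r c hrM hcN
      rw [pvGoodAt_set g i j _ r c hgiL hgjL]
      by_cases hrc : r = i ∧ c = j
      · obtain ⟨rfl, rfl⟩ := hrc
        rw [if_pos ⟨rfl, rfl⟩, if_pos (Or.inr ⟨rfl, le_rfl⟩), hvalR2 hopen]
        push_cast
        rfl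
      · rw [if_neg hrc, he r c hrM hcN]
        refine if_congr ?_ rfl rfl
        constructor <;> rintro (h | ⟨h1, h2⟩)
        · exact Or.inl h
        · subst h1
          rcases Nat.lt_or_ge j c with hlt | hge
          · exact Or.inr ⟨rfl, by omega⟩
          · exact absurd ⟨rfl, by omega⟩ hrc
        · exact Or.inl h
        · subst h1
          exact Or.inr ⟨rfl, by omega⟩
  · rw [if_neg hopen]
    rw [pvGet2_natCast] at hopen
    rw [not_not] at hopen
    refine ⟨hlen, hrows, ?_⟩
    intro r c hrM hcN
    rw [he r c hrM hcN]
    by_cases hrc : r = i ∧ c = j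
    · -- the skipped cell: it stays false, and pvR2 is false there since the cell is closed
      obtain ⟨rfl, rfl⟩ := hrc
      rw [if_neg (by omega), if_pos (Or.inr ⟨rfl, le_rfl⟩)]
      rw [pvR2_interior a (r+1) (c+1) (by omega) (by omega) (by omega) (by omega)]
      simp only [Nat.add_sub_cancel]
      have : (pvG a r c != 0) = false := by simpa using hopen
      rw [this]
      simp
    · refine if_congr ?_ rfl rfl
      constructor <;> rintro (h | ⟨h1, h2⟩)
      · exact Or.inl h
      · subst h1
        rcases Nat.lt_or_ge j c with hlt | hge
        · exact Or.inr ⟨rfl, by omega⟩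
        · exact absurd ⟨rfl, by omega⟩ hrc
      · exact Or.inl h
      · subst h1
        exact Or.inr ⟨rfl, by omega⟩

theorem pvInvG_shift (a : List (List Int)) (g : List (List Bool)) (i : Nat)
    (hg : pvInvG a g (i+1) 0) : pvInvG a g i (a.headD []).length := by
  obtain ⟨h1, h2, he⟩ := hg
  refine ⟨h1, h2, ?_⟩
  intro r c hr hc
  rw [he r c hr hc]
  refine if_congr ?_ rfl rfl
  constructor <;> rintro (h | ⟨h3, h4⟩)
  · exact Or.inl (by omega)
  · exact Or.inl (by omega)
  · rcases Nat.lt_or_ge (i+1) r with hlt | hge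
    · exact Or.inl hlt
    · exact Or.inr ⟨by omega, by omega⟩
  · omega

theorem pvInnerG (a : List (List Int)) (i : Nat) (hi : i < a.length) :
    ∀ t, t ≤ (a.headD []).length → ∀ g, pvInvG a g (i+1) 0 →
    pvInvG a ((List.range t).foldl (fun g (k2 : Nat) =>
        pvGStep a (a.length:Int) ((a.headD []).length:Int) g (i:Int)
          ((((a.headD []).length:Int)) - 1 - (k2:Int))) g) i ((a.headD []).length - t) := by
  intro t
  induction t with
  | zero =>
    intro _ g hg
    simpa using pvInvG_shift a g i hg
  | succ t ih =>
    intro ht g hg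
    rw [List.range_succ, List.foldl_append, List.foldl_cons, List.foldl_nil]
    rw [show ((((a.headD []).length:Int)) - 1 - (t:Int))
        = (((a.headD []).length - (t+1) : Nat):Int) by omega]
    apply pvInvG_step a _ i ((a.headD []).length - (t+1)) hi (by omega)
    have := ih (by omega) g hg
    rw [show (a.headD []).length - t = ((a.headD []).length - (t+1)) + 1 by omega] at this
    exact this

theorem pvOuterG (a : List (List Int)) :
    ∀ t, t ≤ a.length → ∀ g, pvInvG a g a.length 0 →
    pvInvG a ((List.range t).foldl (fun g (k : Nat) =>
        (List.range (a.headD []).length).foldl (fun g (k2 : Nat) =>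
          pvGStep a (a.length:Int) ((a.headD []).length:Int) g ((a.length:Int) - 1 - (k:Int))
            ((((a.headD []).length:Int)) - 1 - (k2:Int))) g) g) (a.length - t) 0 := by
  intro t
  induction t with
  | zero => intro _ g hg; simpa using hg
  | succ t ih =>
    intro ht g hg
    rw [List.range_succ, List.foldl_append, List.foldl_cons, List.foldl_nil]
    rw [show ((a.length:Int) - 1 - (t:Int)) = ((a.length - (t+1) : Nat):Int) by omega]
    have inner := pvInnerG a (a.length - (t+1)) (by omega) (a.headD []).length le_rfl _
      (by
        have := ih (by omega) g hg
        rw [show a.length - t = (a.length - (t+1)) + 1 by omega] at this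
        exact this)
    rw [Nat.sub_self] at inner
    exact inner

theorem pvInitG (a : List (List Int)) :
    pvInvG a ((PySem.List.pyRange 0 ((a.length:Int)) 1).map
      (fun _ => PySem.List.pyRepeat [false] (((a.headD []).length:Int)))) a.length 0 := by
  refine ⟨by simp [PySem.List.length_pyRange_one], ?_, ?_⟩
  · intro r hr
    obtain ⟨_, _, rfl⟩ := List.mem_map.mp hr
    rw [PySem.List.pyRepeat_singleton, List.length_replicate]
    omega
  · intro r c hr hc
    have hrowv : ∀ row ∈ (PySem.List.pyRange 0 ((a.length:Int)) 1).map
        (fun _ => PySem.List.pyRepeat [false] (((a.headD []).length:Int))),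
        ∀ c' : Nat, row.getD c' false = false := by
      intro row hrowm c'
      obtain ⟨_, _, rfl⟩ := List.mem_map.mp hrowm
      rw [PySem.List.pyRepeat_singleton, List.getD_eq_getElem?_getD, List.getElem?_replicate]
      split_ifs <;> simp
    set T := (PySem.List.pyRange 0 ((a.length:Int)) 1).map
        (fun _ => PySem.List.pyRepeat [false] (((a.headD []).length:Int))) with hT
    have : pvGoodAt T r c = false := by
      unfold pvGoodAt
      have hcase : T.getD r [] = [] ∨ T.getD r [] ∈ T := by
        by_cases hrl : r < T.length
        · right
          simp only [List.getD_eq_getElem?_getD, List.getElem?_eq_getElem hrl, Option.getD_some]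
          exact List.getElem_mem hrl
        · left
          rw [List.getD_eq_getElem?_getD, List.getElem?_eq_none (by omega)]
          rfl
      rcases hcase with hcs | hcs
      · rw [hcs]
        rfl
      · exact hrowv _ hcs c
    rw [this, if_neg (by omega)]

-- ---- B, the two greedy walks ----

theorem pvFoldlConst {α β : Type} (f : α → α) :
    ∀ (l : List β) (x : α), l.foldl (fun s _ => f s) x = f^[l.length] x := by
  intro l
  induction l with
  | nil => intro x; simp
  | cons y ys ih =>
    intro x
    rw [List.foldl_cons, ih, List.length_cons, Function.iterate_succ_apply]

-- invariant of the prefer-right walk: its cell is doubly reachable and is the topmost one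
def pvHiInvP (a : List (List Int)) (d : Nat) : Prop :=
  pvHiR a d ≤ d ∧ pvHiR a d < a.length ∧ d - pvHiR a d < (a.headD []).length ∧
  pvBR a (pvHiR a d) (d - pvHiR a d) = true ∧
  ∀ r, r ≤ d → r < a.length → d - r < (a.headD []).length → pvBR a r (d-r) = true →
    pvHiR a d ≤ r

def pvLoInvP (a : List (List Int)) (d : Nat) : Prop :=
  pvLoR a d ≤ d ∧ pvLoR a d < a.length ∧ d - pvLoR a d < (a.headD []).length ∧
  pvBR a (pvLoR a d) (d - pvLoR a d) = true ∧
  ∀ r, r ≤ d → r < a.length → d - r < (a.headD []).length → pvBR a r (d-r) = true →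
    r ≤ pvLoR a d

theorem pvHiInv (a : List (List Int)) (hstart : pvBR a 0 0 = true) :
    ∀ d, d ≤ a.length + (a.headD []).length - 3 → pvHiInvP a d := by
  intro d
  induction d with
  | zero =>
    intro _
    obtain ⟨h1, h2⟩ := pvBR_bounds a 0 0 hstart
    exact ⟨le_rfl, h1, h2, by simpa [pvHiR] using hstart, fun r hr _ _ _ => by
      simp [pvHiR]⟩
  | succ d ih =>
    intro hd
    unfold pvHiInvP
    obtain ⟨hle, hm', hn', hbr, hmin⟩ := ih (by omega)
    set M := a.length with hM
    set N := (a.headD []).length with hN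
    set i := pvHiR a d with hi
    -- the current cell is not the exit (its diagonal is too small), so a successor is reachable
    have hnotexit : ¬(i = M - 1 ∧ d - i = N - 1) := by
      rintro ⟨e1, e2⟩
      omega
    have hsucc : pvR2 a (i+2) (d-i+1) = true ∨ pvR2 a (i+1) (d-i+2) = true := by
      unfold pvBR at hbr
      obtain ⟨_, hR2⟩ := Bool.and_eq_true_iff.mp hbr
      rw [pvR2_interior a (i+1) ((d-i)+1) (by omega) (by omega) (by omega) (by omega)] at hR2
      obtain ⟨_, hor⟩ := Bool.and_eq_true_iff.mp hR2
      rcases Bool.or_eq_true_iff.mp hor with h | h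
      · exact Or.inl h
      · exact Or.inr h
    have hstep : pvHiR a (d+1) = if d+1-i < N ∧ pvR2 a (i+1) (d+1-i+1) = true then i else i+1 := by
      rw [pvHiR]
    by_cases hcond : d+1-i < N ∧ pvR2 a (i+1) (d+1-i+1) = true
    · -- step right
      rw [hstep, if_pos hcond]
      obtain ⟨hcN, hR2r⟩ := hcond
      have hcol : d+1-i = (d-i)+1 := by omega
      have hR1r : pvR1 a (i+1) (d+1-i+1) = true := by
        rw [pvR1_interior a (i+1) (d+1-i+1) (by omega) (by omega) (by omega) (by omega)]
        simp only [Nat.add_sub_cancel]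
        have hopen : pvG a i (d+1-i) ≠ 0 := by
          rw [pvR2_interior a (i+1) (d+1-i+1) (by omega) (by omega) (by omega) (by omega)] at hR2r
          simp only [Nat.add_sub_cancel] at hR2r
          intro h0
          rw [h0] at hR2r
          simp at hR2r
        have hcur : pvR1 a (i+1) (d+1-i) = true := by
          rw [hcol]
          unfold pvBR at hbr
          exact (Bool.and_eq_true_iff.mp hbr).1
        simp only [hcur, Bool.or_true, Bool.and_true]
        simpa using hopen
      refine ⟨by omega, hm', by omega, ?_, ?_⟩
      · unfold pvBR
        rw [hR1r, hR2r]
        rfl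
      · intro r hr hrM hrN hbrr
        rcases pvBR_pred a r (d+1-r) (by omega) hbrr with ⟨hrpos, hp⟩ | ⟨hcpos, hp⟩
        · have hb := pvBR_bounds a (r-1) (d+1-r) hp
          have : pvHiR a d ≤ r - 1 := hmin (r-1) (by omega) hb.1
            (by rw [show d - (r-1) = d+1-r by omega]; exact hb.2)
            (by rw [show d - (r-1) = d+1-r by omega]; exact hp)
          omega
        · have hb := pvBR_bounds a r (d+1-r-1) hp
          have : pvHiR a d ≤ r := hmin r (by omega) hb.1
            (by rw [show d - r = d+1-r-1 by omega]; exact hb.2)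
            (by rw [show d - r = d+1-r-1 by omega]; exact hp)
          omega
    · -- step down
      rw [hstep, if_neg hcond]
      have hdn : pvR2 a (i+2) (d-i+1) = true := by
        rcases hsucc with h | h
        · exact h
        · exfalso
          apply hcond
          constructor
          · -- if the right cell's pvR2 holds it is in the grid (the seed case is excluded)
            by_contra hge
            have hout : pvR2 a (i+1) (d-i+2) = false := by
              apply pvR2_out
              · rintro ⟨e1, e2⟩
                omega
              · omega
            rw [hout] at h
            exact absurd h Bool.false_ne_true
          · rw [show d+1-i+1 = d-i+2 by omega]
            exact h
      have hiM : i+1 < M := by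
        by_contra hge
        have : pvR2 a (i+2) (d-i+1) = false := pvR2_out a (i+2) (d-i+1) (by omega) (by omega)
        rw [this] at hdn
        exact absurd hdn Bool.false_ne_true
      have hR1d : pvR1 a (i+2) (d-i+1) = true := by
        rw [pvR1_interior a (i+2) (d-i+1) (by omega) (by omega) (by omega) (by omega)]
        simp only [Nat.add_sub_cancel]
        rw [show i+2-1 = i+1 by omega]
        have hopen : pvG a (i+1) (d-i) ≠ 0 := by
          rw [pvR2_interior a (i+2) (d-i+1) (by omega) (by omega) (by omega) (by omega)] at hdn
          simp only [Nat.add_sub_cancel] at hdn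
          rw [show i+2-1 = i+1 by omega] at hdn
          intro h0
          rw [h0] at hdn
          simp at hdn
        have hcur : pvR1 a (i+1) (d-i+1) = true := by
          unfold pvBR at hbr
          exact (Bool.and_eq_true_iff.mp hbr).1
        simp only [hcur, Bool.true_or, Bool.and_true]
        simpa using hopen
      have hcol : d+1-(i+1) = d-i := by omega
      refine ⟨by omega, hiM, by omega, ?_, ?_⟩
      · unfold pvBR
        rw [hcol, show d-i+1 = (d-i)+1 from rfl] at *
        rw [hR1d, hdn]
        rfl
      · intro r hr hrM hrN hbrr
        rcases pvBR_pred a r (d+1-r) (by omega) hbrr with ⟨hrpos, hp⟩ | ⟨hcpos, hp⟩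
        · have hb := pvBR_bounds a (r-1) (d+1-r) hp
          have hge : i ≤ r - 1 := hmin (r-1) (by omega) hb.1
            (by rw [show d - (r-1) = d+1-r by omega]; exact hb.2)
            (by rw [show d - (r-1) = d+1-r by omega]; exact hp)
          omega
        · have hb := pvBR_bounds a r (d+1-r-1) hp
          have hge : i ≤ r := hmin r (by omega) hb.1
            (by rw [show d - r = d+1-r-1 by omega]; exact hb.2)
            (by rw [show d - r = d+1-r-1 by omega]; exact hp)
          -- exclude r = i: then the right cell of the walk would be doubly reachable
          by_cases hri : r = i
          · exfalso
            subst hri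
            apply hcond
            obtain ⟨_, hR2r⟩ := Bool.and_eq_true_iff.mp hbrr
            exact ⟨by omega, hR2r⟩
          · omega

theorem pvLoInv (a : List (List Int)) (hstart : pvBR a 0 0 = true)
    (hbig : 4 ≤ a.length + (a.headD []).length) :
    ∀ d, d ≤ a.length + (a.headD []).length - 3 → pvLoInvP a d := by
  intro d
  induction d with
  | zero =>
    intro _
    obtain ⟨h1, h2⟩ := pvBR_bounds a 0 0 hstart
    exact ⟨le_rfl, h1, h2, by simpa [pvLoR] using hstart, fun r hr _ _ _ => by omega⟩
  | succ d ih =>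
    intro hd
    unfold pvLoInvP
    obtain ⟨hle, hm', hn', hbr, hmax⟩ := ih (by omega)
    set M := a.length with hM
    set N := (a.headD []).length with hN
    set i := pvLoR a d with hi
    have hnotexit : ¬(i = M - 1 ∧ d - i = N - 1) := by
      rintro ⟨e1, e2⟩
      omega
    have hsucc : pvR2 a (i+2) (d-i+1) = true ∨ pvR2 a (i+1) (d-i+2) = true := by
      unfold pvBR at hbr
      obtain ⟨_, hR2⟩ := Bool.and_eq_true_iff.mp hbr
      rw [pvR2_interior a (i+1) ((d-i)+1) (by omega) (by omega) (by omega) (by omega)] at hR2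
      obtain ⟨_, hor⟩ := Bool.and_eq_true_iff.mp hR2
      rcases Bool.or_eq_true_iff.mp hor with h | h
      · exact Or.inl h
      · exact Or.inr h
    have hstep : pvLoR a (d+1) = if i+1 < M ∧ pvR2 a (i+2) (d-i+1) = true then i+1 else i := by
      rw [pvLoR]
    by_cases hcond : i+1 < M ∧ pvR2 a (i+2) (d-i+1) = true
    · -- step down
      rw [hstep, if_pos hcond]
      obtain ⟨hiM, hdn⟩ := hcond
      have hR1d : pvR1 a (i+2) (d-i+1) = true := by
        rw [pvR1_interior a (i+2) (d-i+1) (by omega) (by omega) (by omega) (by omega)]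
        simp only [Nat.add_sub_cancel]
        rw [show i+2-1 = i+1 by omega]
        have hopen : pvG a (i+1) (d-i) ≠ 0 := by
          rw [pvR2_interior a (i+2) (d-i+1) (by omega) (by omega) (by omega) (by omega)] at hdn
          simp only [Nat.add_sub_cancel] at hdn
          rw [show i+2-1 = i+1 by omega] at hdn
          intro h0
          rw [h0] at hdn
          simp at hdn
        have hcur : pvR1 a (i+1) (d-i+1) = true := by
          unfold pvBR at hbr
          exact (Bool.and_eq_true_iff.mp hbr).1
        simp only [hcur, Bool.true_or, Bool.and_true]
        simpa using hopen
      have hcol : d+1-(i+1) = d-i := by omega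
      refine ⟨by omega, hiM, by omega, ?_, ?_⟩
      · unfold pvBR
        rw [hcol]
        rw [show (d-i)+1 = d-i+1 from rfl, hR1d, hdn]
        rfl
      · intro r hr hrM hrN hbrr
        rcases pvBR_pred a r (d+1-r) (by omega) hbrr with ⟨hrpos, hp⟩ | ⟨hcpos, hp⟩
        · have hb := pvBR_bounds a (r-1) (d+1-r) hp
          have : r - 1 ≤ i := hmax (r-1) (by omega) hb.1
            (by rw [show d - (r-1) = d+1-r by omega]; exact hb.2)
            (by rw [show d - (r-1) = d+1-r by omega]; exact hp)
          omega
        · have hb := pvBR_bounds a r (d+1-r-1) hp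
          have : r ≤ i := hmax r (by omega) hb.1
            (by rw [show d - r = d+1-r-1 by omega]; exact hb.2)
            (by rw [show d - r = d+1-r-1 by omega]; exact hp)
          omega
    · -- step right
      rw [hstep, if_neg hcond]
      have hdnf : pvR2 a (i+2) (d-i+1) ≠ true := by
        intro h
        by_cases hiM : i+1 < M
        · exact hcond ⟨hiM, h⟩
        · have : pvR2 a (i+2) (d-i+1) = false := pvR2_out a (i+2) (d-i+1) (by omega) (by omega)
          rw [this] at h
          exact absurd h Bool.false_ne_true
      have hR2r : pvR2 a (i+1) (d-i+2) = true := by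
        rcases hsucc with h | h
        · exact absurd h hdnf
        · exact h
      have hcN : d-i+1 < N := by
        by_contra hge
        have : pvR2 a (i+1) (d-i+2) = false := by
          apply pvR2_out
          · rintro ⟨e1, e2⟩
            omega
          · omega
        rw [this] at hR2r
        exact absurd hR2r Bool.false_ne_true
      have hR1r : pvR1 a (i+1) (d-i+2) = true := by
        rw [pvR1_interior a (i+1) (d-i+2) (by omega) (by omega) (by omega) (by omega)]
        simp only [Nat.add_sub_cancel]
        rw [show d-i+2-1 = d-i+1 by omega]
        have hopen : pvG a i (d-i+1) ≠ 0 := by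
          rw [pvR2_interior a (i+1) (d-i+2) (by omega) (by omega) (by omega) (by omega)] at hR2r
          simp only [Nat.add_sub_cancel] at hR2r
          rw [show d-i+2-1 = d-i+1 by omega] at hR2r
          intro h0
          rw [h0] at hR2r
          simp at hR2r
        have hcur : pvR1 a (i+1) (d-i+1) = true := by
          unfold pvBR at hbr
          exact (Bool.and_eq_true_iff.mp hbr).1
        simp only [hcur, Bool.or_true, Bool.and_true]
        simpa using hopen
      have hcol : d+1-i = d-i+1 := by omega
      refine ⟨by omega, hm', by omega, ?_, ?_⟩
      · unfold pvBR
        rw [hcol, show (d-i+1)+1 = d-i+2 from rfl, hR1r, hR2r]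
        rfl
      · intro r hr hrM hrN hbrr
        -- show r ≤ i; r = i+1 is impossible (it would force the down step)
        by_cases hri : r ≤ i
        · exact hri
        exfalso
        rcases pvBR_pred a r (d+1-r) (by omega) hbrr with ⟨hrpos, hp⟩ | ⟨hcpos, hp⟩
        · have hb := pvBR_bounds a (r-1) (d+1-r) hp
          have h1 : r - 1 ≤ i := hmax (r-1) (by omega) hb.1
            (by rw [show d - (r-1) = d+1-r by omega]; exact hb.2)
            (by rw [show d - (r-1) = d+1-r by omega]; exact hp)
          -- r = i+1: then pvBR a (i+1) (d-i) holds, whose pvR2 forces the down branch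
          have hreq : r = i+1 := by omega
          subst hreq
          obtain ⟨_, hR2d⟩ := Bool.and_eq_true_iff.mp hbrr
          rw [show d+1-(i+1) = d-i by omega] at hR2d
          exact hdnf (by rw [show d-i+1 = (d-i)+1 from rfl]; exact hR2d)
        · have hb := pvBR_bounds a r (d+1-r-1) hp
          have h1 : r ≤ i := hmax r (by omega) hb.1
            (by rw [show d - r = d+1-r-1 by omega]; exact hb.2)
            (by rw [show d - r = d+1-r-1 by omega]; exact hp)
          omega

-- the walk fold computes the two walk rows and the running pinch flag
theorem pvWalkFold (a : List (List Int)) (g : List (List Bool))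
    (hg : ∀ r c : Nat, r < a.length → c < (a.headD []).length →
      pvGoodAt g r c = pvR2 a (r+1) (c+1))
    (hstart : pvBR a 0 0 = true) :
    ∀ t, t ≤ a.length + (a.headD []).length - 3 →
    (pvWalkStep g (a.length:Int) ((a.headD []).length:Int))^[t]
        (((0:Int),(0:Int)), (((0:Int),(0:Int)), false))
      = (((pvHiR a t : Int), ((t - pvHiR a t : Nat) : Int)),
         (((pvLoR a t : Int), ((t - pvLoR a t : Nat) : Int)),
          (List.range t).any (fun k => pvHiR a (k+1) == pvLoR a (k+1)))) := by
  intro t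
  induction t with
  | zero => simp [pvHiR, pvLoR]
  | succ t ih =>
    intro ht
    rw [Function.iterate_succ_apply', ih (by omega)]
    obtain ⟨hHle, hHm, hHn, hHbr, _⟩ := pvHiInv a hstart t (by omega)
    obtain ⟨hLle, hLm, hLn, hLbr, _⟩ := pvLoInv a hstart (by omega) t (by omega)
    set M := a.length with hM
    set N := (a.headD []).length with hN
    set i := pvHiR a t with hiDef
    set l := pvLoR a t with hlDef
    unfold pvWalkStep
    simp only
    -- hi branch condition matches the definition of pvHiR (t+1)
    have ehc : (decide (((t - i : Nat):Int) + 1 < (N:Int))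
        && pvGoodGet g (i:Int) (((t - i : Nat):Int) + 1))
        = decide (t+1-i < N ∧ pvR2 a (i+1) (t+1-i+1) = true) := by
      by_cases hcN : t+1-i < N
      · have e1 : decide (((t - i : Nat):Int) + 1 < (N:Int)) = true := by
          apply decide_eq_true
          omega
        rw [e1, Bool.true_and,
          show (((t - i : Nat):Int) + 1) = (((t-i+1 : Nat)):Int) by omega,
          pvGoodGet_natCast, hg i (t-i+1) hHm (by omega),
          show t-i+1+1 = t+1-i+1 by omega]
        by_cases hv : pvR2 a (i+1) (t+1-i+1) = true
        · rw [decide_eq_true (show t+1-i < (a.headD []).length ∧ pvR2 a (i+1) (t+1-i+1) = true from ⟨hcN, hv⟩), hv]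
        · rw [decide_eq_false (by intro hcon; exact hv hcon.2)]
          revert hv
          cases pvR2 a (i+1) (t+1-i+1) <;> simp
      · rw [decide_eq_false (by omega : ¬(((t - i : Nat):Int) + 1 < (N:Int))),
          decide_eq_false (by intro hcon; exact hcN hcon.1)]
        simp
    have elc : (decide (((l : Nat):Int) + 1 < (M:Int))
        && pvGoodGet g (((l : Nat):Int) + 1) (((t - l : Nat):Int)))
        = decide (l+1 < M ∧ pvR2 a (l+2) (t-l+1) = true) := by
      by_cases hlM : l+1 < M
      · have e1 : decide (((l : Nat):Int) + 1 < (M:Int)) = true := by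
          apply decide_eq_true
          omega
        rw [e1, Bool.true_and,
          show (((l : Nat):Int) + 1) = (((l+1 : Nat)):Int) by omega,
          pvGoodGet_natCast, hg (l+1) (t-l) (by omega) hLn,
          show l+1+1 = l+2 from rfl]
        by_cases hv : pvR2 a (l+2) (t-l+1) = true
        · rw [decide_eq_true (show l+1 < a.length ∧ pvR2 a (l+2) (t-l+1) = true from ⟨hlM, hv⟩), hv]
        · rw [decide_eq_false (by intro hcon; exact hv hcon.2)]
          revert hv
          cases pvR2 a (l+2) (t-l+1) <;> simp
      · rw [decide_eq_false (by omega : ¬(((l : Nat):Int) + 1 < (M:Int))),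
          decide_eq_false (by intro hcon; exact hlM hcon.1)]
        simp
    have ehi : (if (decide (((t - i : Nat):Int) + 1 < (N:Int))
          && pvGoodGet g (i:Int) (((t - i : Nat):Int) + 1)) = true
        then ((i:Int), ((t - i : Nat):Int) + 1)
        else ((i:Int) + 1, ((t - i : Nat):Int)))
        = (((pvHiR a (t+1) : Nat):Int), ((t+1 - pvHiR a (t+1) : Nat):Int)) := by
      rw [ehc, pvHiR]
      by_cases hcond : t+1-i < N ∧ pvR2 a (i+1) (t+1-i+1) = true
      · rw [decide_eq_true hcond, if_pos rfl, if_pos hcond, ← hiDef]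
        have : ((t - i : Nat):Int) + 1 = ((t+1-i : Nat):Int) := by omega
        rw [this]
      · rw [decide_eq_false hcond, if_neg hcond, ← hiDef]
        simp only [Bool.false_eq_true, if_false]
        have e1 : ((i:Int) + 1) = (((i+1 : Nat)):Int) := by omega
        have e2 : ((t - i : Nat):Int) = ((t+1-(i+1) : Nat):Int) := by omega
        rw [e1, e2]
    have elo : (if (decide (((l : Nat):Int) + 1 < (M:Int))
          && pvGoodGet g (((l : Nat):Int) + 1) (((t - l : Nat):Int))) = true
        then (((l : Nat):Int) + 1, ((t - l : Nat):Int))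
        else (((l : Nat):Int), ((t - l : Nat):Int) + 1))
        = (((pvLoR a (t+1) : Nat):Int), ((t+1 - pvLoR a (t+1) : Nat):Int)) := by
      rw [elc, pvLoR]
      by_cases hcond : l+1 < M ∧ pvR2 a (l+2) (t-l+1) = true
      · rw [decide_eq_true hcond, if_pos rfl, if_pos hcond, ← hlDef]
        have e1 : ((l : Nat):Int) + 1 = (((l+1 : Nat)):Int) := by omega
        have e2 : ((t - l : Nat):Int) = ((t+1-(l+1) : Nat):Int) := by omega
        rw [e1, e2]
      · rw [decide_eq_false hcond, if_neg hcond, ← hlDef]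
        simp only [Bool.false_eq_true, if_false]
        have : ((t - l : Nat):Int) + 1 = ((t+1-l : Nat):Int) := by omega
        rw [this]
    rw [ehi, elo]
    -- the pair comparison reduces to comparing the rows
    have epinch : ((((pvHiR a (t+1) : Nat):Int), ((t+1 - pvHiR a (t+1) : Nat):Int))
          == (((pvLoR a (t+1) : Nat):Int), ((t+1 - pvLoR a (t+1) : Nat):Int)))
        = (pvHiR a (t+1) == pvLoR a (t+1)) := by
      obtain ⟨hH1, _, _, _, _⟩ := pvHiInv a hstart (t+1) (by omega)
      obtain ⟨hL1, _, _, _, _⟩ := pvLoInv a hstart (by omega) (t+1) (by omega)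
      by_cases he : pvHiR a (t+1) = pvLoR a (t+1)
      · rw [he]
        simp
      · have : ((pvHiR a (t+1) : Nat):Int) ≠ ((pvLoR a (t+1) : Nat):Int) := by
          intro hcon
          exact he (by omega)
        simp [Prod.ext_iff, this, he]
    rw [epinch, List.range_succ, List.any_append]
    simp

-- the pinch criterion: on an interior diagonal A's count is < 2 iff the walks pinch
theorem pvPinch (a : List (List Int)) (hstart : pvBR a 0 0 = true)
    (hbig : 4 ≤ a.length + (a.headD []).length)
    (d : Nat) (hd : d ≤ a.length + (a.headD []).length - 3) :
    (pvDiagSum a d < 2) ↔ pvHiR a d = pvLoR a d := by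
  obtain ⟨hHle, hHm, hHn, hHbr, hHmin⟩ := pvHiInv a hstart d hd
  obtain ⟨hLle, hLm, hLn, hLbr, hLmax⟩ := pvLoInv a hstart hbig d hd
  constructor
  · intro hlt
    by_contra hne
    have := pvDiagSum_ge_two a d (pvHiR a d) (pvLoR a d) hne hHm hHle hHn hHbr hLm hLle hLn hLbr
    omega
  · intro heq
    have h1 : pvDiagSum a d = 1 := by
      apply pvDiagSum_eq_one a d (pvHiR a d) hHm hHle hHn hHbr
      intro k hk hkd hdk hbrk
      have hlow := hHmin k hkd hk hdk hbrk
      have hhigh := hLmax k hkd hk hdk hbrk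
      omega
    omega

-- ---- main equivalence ----

-- on grids with m+n < 4 A's final `any` ranges over an empty list
theorem pvA_small (a : List (List Int)) (h : a.length + (a.headD []).length ≤ 3) :
    isPossibleToCutPath a = false := by
  unfold isPossibleToCutPath
  simp only [pvHead]
  rw [PySem.List.pyRange_one_eq_nil
    (by omega : (((a.headD []).length:Int)) + ((a.length:Int)) - 2 ≤ 1)]
  rfl

theorem pv_main (a : List (List Int)) (h : Pre_isPossibleToCutPath a) :
    isPossibleToCutPath a = isPossibleToCutPath_alt a := by
  obtain ⟨hne, hn3, _⟩ := h
  have hm : 1 ≤ a.length := by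
    cases a with
    | nil => exact absurd rfl hne
    | cons x xs => simp
  set M := a.length with hM
  set N := (a.headD []).length with hN
  by_cases hmn : (M:Int) + (N:Int) < 4
  · rw [pvA_small a (by omega)]
    unfold isPossibleToCutPath_alt
    simp only [pvHead]
    rw [if_pos hmn]
  · have hn : 1 ≤ N := by omega
    rw [pvA_char a hm hn]
    unfold isPossibleToCutPath_alt
    simp only [pvHead]
    rw [if_neg hmn]
    have hbig : 4 ≤ M + N := by omega
    -- the reverse scan computes pvR2
    have hfold : pvInvG a ((PySem.List.pyRange ((M:Int)-1) (-1) (-1)).foldl (fun g i =>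
        (PySem.List.pyRange ((N:Int)-1) (-1) (-1)).foldl
          (fun g j => pvGStep a (M:Int) (N:Int) g i j) g)
        ((PySem.List.pyRange 0 (M:Int) 1).map (fun _ => PySem.List.pyRepeat [false] (N:Int))))
        0 0 := by
      rw [PySem.List.pyRange_neg_one ((M:Int)-1) (-1),
        show ((M:Int)-1-(-1)).toNat = M by omega,
        PySem.List.pyRange_neg_one ((N:Int)-1) (-1),
        show ((N:Int)-1-(-1)).toNat = N by omega]
      simp only [List.foldl_map]
      have := pvOuterG a M le_rfl _ (pvInitG a)
      rw [Nat.sub_self] at this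
      exact this
    set G := (PySem.List.pyRange ((M:Int)-1) (-1) (-1)).foldl (fun g i =>
        (PySem.List.pyRange ((N:Int)-1) (-1) (-1)).foldl
          (fun g j => pvGStep a (M:Int) (N:Int) g i j) g)
        ((PySem.List.pyRange 0 (M:Int) 1).map (fun _ => PySem.List.pyRepeat [false] (N:Int)))
      with hG
    have hgood : ∀ r c : Nat, r < M → c < N → pvGoodAt G r c = pvR2 a (r+1) (c+1) := by
      intro r c hr hc
      obtain ⟨_, _, he⟩ := hfold
      rw [he r c hr hc]
      rcases Nat.eq_zero_or_pos r with hr0 | hrpos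
      · rw [if_pos (Or.inr ⟨hr0, Nat.zero_le c⟩)]
      · rw [if_pos (Or.inl hrpos)]
    have hG00 : pvGoodGet G 0 0 = pvR2 a 1 1 := by
      rw [show (0:Int) = ((0:Nat):Int) from rfl, pvGoodGet_natCast]
      exact hgood 0 0 (by omega) (by omega)
    by_cases hR2 : pvR2 a 1 1 = true
    · rw [hG00, hR2]
      simp only [Bool.not_true, Bool.false_eq_true, if_false]
      -- start is doubly reachable
      have hstart : pvBR a 0 0 = true := by
        have hopen : pvG a 0 0 ≠ 0 := by
          rw [pvR2_interior a 1 1 (by omega) (by omega) (by omega) (by omega)] at hR2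
          simp only [Nat.sub_self] at hR2
          intro h0
          rw [h0] at hR2
          simp at hR2
        have hR1 : pvR1 a 1 1 = true := by
          rw [pvR1_interior a 1 1 (by omega) (by omega) (by omega) (by omega)]
          simp only [Nat.sub_self, pvR1_zero]
          simpa using hopen
        unfold pvBR
        rw [hR1, hR2]
        rfl
      rw [show (fun (st : (Int × Int) × (Int × Int) × Bool) (_ : Int) =>
            pvWalkStep G (M:Int) (N:Int) st)
          = (fun st _ => pvWalkStep G (M:Int) (N:Int) st) from rfl]
      rw [pvFoldlConst (pvWalkStep G (M:Int) (N:Int)) _ _,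
        PySem.List.length_pyRange_one,
        show ((M:Int)+(N:Int)-3-0).toNat = M+N-3 by omega,
        pvWalkFold a G hgood hstart (M+N-3) le_rfl]
      simp only
      -- now compare the two `any`s
      rw [PySem.List.pyRange_one 1 ((N:Int)+(M:Int)-2),
        show ((N:Int)+(M:Int)-2-1).toNat = M+N-3 by omega, List.any_map]
      apply PySem.List.any_congr_mem
      intro k hk
      have hkR : k < M+N-3 := by simpa using hk
      simp only [Function.comp]
      rw [show ((1:Int) + (k:Int)).toNat = k+1 by omega]
      have hiff := pvPinch a hstart hbig (k+1) (by omega)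
      have e1 : (pvHiR a (k+1) == pvLoR a (k+1)) = decide (pvHiR a (k+1) = pvLoR a (k+1)) := by
        by_cases h2 : pvHiR a (k+1) = pvLoR a (k+1) <;> simp [h2]
      rw [e1]
      exact decide_eq_decide.mpr hiff
    · rw [hG00]
      have : pvR2 a 1 1 = false := by
        revert hR2
        cases pvR2 a 1 1 <;> simp
      rw [this]
      simp only [Bool.not_false, if_pos]
      rw [List.any_eq_true]
      refine ⟨1, ?_, ?_⟩
      · rw [PySem.List.mem_pyRange_one]
        omega
      · rw [show (1:Int).toNat = 1 from rfl, pvDiagSum_zero a (by rw [this]; simp) 1]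
        simp

-- ===== VERDICT (by name: the statement is the Claim_ definition above) =====
theorem isPossibleToCutPath_spec : Claim_equal_isPossibleToCutPath := by
  intro a _ hp
  unfold Spec_isPossibleToCutPath
  exact pv_main a hp
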